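-- pv_equiv track=rewrite | github.com/ReadJ777/Patents | TERNARY_PROTOTYPE/gpu/ternary_gpu_demo.py | ternary_matmul
-- ===== SOURCE A (Python) =====
-- TRIT_ZERO = 0b00
--
-- TRIT_NEG = 0b01
--
-- TRIT_POS = 0b10
--
-- TRIT_PSI = 0b11
--
-- def ternary_matmul(A, B):
--     """Ternary matrix multiplication"""
--     # A is m x k, B is k x n
--     m, k1 = len(A), len(A[0])
--     k2, n = len(B), len(B[0])
--     assert k1 == k2, "Dimension mismatch"
--
--     C = [[0 for _ in range(n)] for _ in range(m)]
--
--     for i in range(m):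
--         for j in range(n):
--             total = 0
--             for k in range(k1):
--                 a_trit, _ = A[i][k]
--                 b_trit, _ = B[k][j]
--
--                 # Ternary multiply
--                 a_val = {TRIT_POS: 1, TRIT_NEG: -1, TRIT_ZERO: 0, TRIT_PSI: 0}[a_trit]
--                 b_val = {TRIT_POS: 1, TRIT_NEG: -1, TRIT_ZERO: 0, TRIT_PSI: 0}[b_trit]
--                 total += a_val * b_val
--
--             C[i][j] = total
--
--     return C
-- ===== SOURCE B (Python) =====
-- TRIT_ZERO = 0b00
--
-- TRIT_NEG = 0b01
--
-- TRIT_POS = 0b10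
--
-- TRIT_PSI = 0b11
--
-- def ternary_matmul(A, B):
--     """Sparse ternary matmul: rows of A and columns of B become index lists of
--     their +1 / -1 positions; each output cell is counted from index membership."""
--     VAL = {TRIT_POS: 1, TRIT_NEG: -1, TRIT_ZERO: 0, TRIT_PSI: 0}
--     def decode(cell):
--         t, _ = cell
--         return VAL[t]
--     m, k1 = len(A), len(A[0])
--     k2, n = len(B), len(B[0])
--     assert k1 == k2, "Dimension mismatch"
--     Apos = [[k for k in range(k1) if decode(row[k]) == 1] for row in A]
--     Aneg = [[k for k in range(k1) if decode(row[k]) == -1] for row in A]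
--     Bpos = [[k for k in range(k2) if decode(B[k][j]) == 1] for j in range(n)]
--     Bneg = [[k for k in range(k2) if decode(B[k][j]) == -1] for j in range(n)]
--     C = []
--     for i in range(m):
--         crow = []
--         for j in range(n):
--             t = 0
--             for k in Apos[i]:
--                 if k in Bpos[j]:
--                     t += 1
--                 elif k in Bneg[j]:
--                     t -= 1
--             for k in Aneg[i]:
--                 if k in Bpos[j]:
--                     t -= 1
--                 elif k in Bneg[j]:
--                     t += 1
--             crow.append(t)
--         C.append(crow)
--     return C
-- ===== Notes on version B (the rewrite author's own statement) =====
-- stated objective: alternative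
-- what changed: B uses a sparse representation: each row of A and column of B is turned into index lists of its +1 and -1 positions, and every output cell is computed by counting index membership (agreements add 1, disagreements subtract 1), instead of A's dense triple loop decoding a dict inside the innermost iteration.
-- outside the precondition, e.g. on ternary_matmul([[(5, -1)]], [[]]): A returns [[]], B raises KeyError; on ternary_matmul([[(0, 0)], []], [[]]): A returns [[], []], B raises IndexError
import Mathlib
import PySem

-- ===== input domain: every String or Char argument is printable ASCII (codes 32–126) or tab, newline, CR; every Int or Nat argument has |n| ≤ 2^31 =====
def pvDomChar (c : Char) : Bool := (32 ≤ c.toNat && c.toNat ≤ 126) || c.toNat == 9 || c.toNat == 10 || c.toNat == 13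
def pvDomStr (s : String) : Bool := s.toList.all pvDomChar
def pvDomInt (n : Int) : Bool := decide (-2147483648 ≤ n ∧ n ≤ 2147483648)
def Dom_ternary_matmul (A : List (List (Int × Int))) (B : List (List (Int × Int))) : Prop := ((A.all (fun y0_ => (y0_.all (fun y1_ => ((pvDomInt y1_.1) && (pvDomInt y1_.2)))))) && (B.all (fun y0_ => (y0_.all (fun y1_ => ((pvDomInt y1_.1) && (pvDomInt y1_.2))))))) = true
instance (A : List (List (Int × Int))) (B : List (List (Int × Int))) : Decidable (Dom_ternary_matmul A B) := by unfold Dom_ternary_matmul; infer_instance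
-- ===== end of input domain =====

-- B is a sparse reformulation: rows of A and columns of B become index lists of their
-- +1/-1 positions and each cell is counted from index membership (objective: alternative).

-- ===== PORT A =====
-- the dict {TRIT_POS:1, TRIT_NEG:-1, TRIT_ZERO:0, TRIT_PSI:0}[t]; Pre_ guarantees t ∈ {0,1,2,3},
-- so the lookup never raises and the if-chain is exact there
def tritVal (t : Int) : Int := if t = 2 then 1 else if t = 1 then -1 else 0

def ternary_matmul (A : List (List (Int × Int))) (B : List (List (Int × Int))) : List (List Int) :=
  let m := A.length
  let k1 := (A.headD []).length
  let n := (B.headD []).length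
  -- assert k1 == k2 : Pre_ guarantees it
  (List.range m).map (fun i =>
    (List.range n).map (fun j =>
      (List.range k1).foldl (fun total k =>
        let a_trit := ((A.getD i []).getD k (0, 0)).1
        let b_trit := ((B.getD k []).getD j (0, 0)).1
        total + tritVal a_trit * tritVal b_trit) 0))

-- ===== PORT B =====
def ternary_matmul_alt (A : List (List (Int × Int))) (B : List (List (Int × Int))) : List (List Int) :=
  let m := A.length
  let k1 := (A.headD []).length
  let k2 := B.length
  let n := (B.headD []).length
  let Apos := A.map (fun row => (List.range k1).filter (fun k => tritVal ((row.getD k (0, 0)).1) == 1))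
  let Aneg := A.map (fun row => (List.range k1).filter (fun k => tritVal ((row.getD k (0, 0)).1) == -1))
  let Bpos := (List.range n).map (fun j => (List.range k2).filter (fun k => tritVal (((B.getD k []).getD j (0, 0)).1) == 1))
  let Bneg := (List.range n).map (fun j => (List.range k2).filter (fun k => tritVal (((B.getD k []).getD j (0, 0)).1) == -1))
  (List.range m).map (fun i =>
    (List.range n).map (fun j =>
      let t1 := (Apos.getD i []).foldl (fun t k =>
        if k ∈ Bpos.getD j [] then t + 1 else if k ∈ Bneg.getD j [] then t - 1 else t) (0 : Int)
      (Aneg.getD i []).foldl (fun t k =>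
        if k ∈ Bpos.getD j [] then t - 1 else if k ∈ Bneg.getD j [] then t + 1 else t) t1))

-- ===== PRECONDITION & SPEC =====
-- Pre_ excludes inputs where A raises (empty A/B, dimension mismatch, short rows, trits
-- outside {0,1,2,3} in the scanned region), plus the n=0 corner (first row of B empty) with a
-- malformed or short row in A: A's loops never touch A's cells there and return empty rows,
-- while B's upfront sparse decode reads every A-cell in the first k1 columns and raises.
def Pre_ternary_matmul (A : List (List (Int × Int))) (B : List (List (Int × Int))) : Prop :=
  A ≠ [] ∧ B ≠ [] ∧ (A.headD []).length = B.length ∧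
  (∀ row ∈ A, (A.headD []).length ≤ row.length ∧
    ∀ c ∈ row.take (A.headD []).length, 0 ≤ c.1 ∧ c.1 ≤ 3) ∧
  (∀ row ∈ B, (B.headD []).length ≤ row.length ∧
    ∀ c ∈ row.take (B.headD []).length, 0 ≤ c.1 ∧ c.1 ≤ 3)
instance (A : List (List (Int × Int))) (B : List (List (Int × Int))) : Decidable (Pre_ternary_matmul A B) := by unfold Pre_ternary_matmul; infer_instance

def pvWitness_ternary_matmul : (List (List (Int × Int))) × (List (List (Int × Int))) :=
  ([[(2, 0), (1, 5)], [(0, 1), (3, 2)]], [[(2, 1)], [(1, 0)]])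

def Spec_ternary_matmul (A : List (List (Int × Int))) (B : List (List (Int × Int))) (out : List (List Int)) : Prop := out = ternary_matmul_alt A B
instance (A : List (List (Int × Int))) (B : List (List (Int × Int))) (out : List (List Int)) : Decidable (Spec_ternary_matmul A B out) := by unfold Spec_ternary_matmul; infer_instance

-- ===== CLAIM (what is proved, stated in full; the proofs are below) =====
def Claim_equal_ternary_matmul : Prop := ∀ (A : List (List (Int × Int))) (B : List (List (Int × Int))), Dom_ternary_matmul A B → Pre_ternary_matmul A B → Spec_ternary_matmul A B (ternary_matmul A B)

-- ===== LEMMAS AND PROOFS =====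

theorem pv_getD_map {α β : Type} (A : List α) (f : α → β) (d : α) (d' : β) (i : ℕ)
    (hi : i < A.length) : (A.map f).getD i d' = f (A.getD i d) := by
  rw [List.getD_eq_getElem _ _ (by simpa using hi), List.getD_eq_getElem _ _ hi, List.getElem_map]

theorem pv_sum_filter (l : List ℕ) (p : ℕ → Bool) (g : ℕ → Int) :
    ((l.filter p).map g).sum = (l.map (fun k => if p k then g k else 0)).sum := by
  induction l with
  | nil => simp
  | cons x xs ih => by_cases h : p x <;> simp [h, ih]

theorem pv_sum_map_add (l : List ℕ) (f g : ℕ → Int) :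
    (l.map f).sum + (l.map g).sum = (l.map (fun k => f k + g k)).sum := by
  induction l with
  | nil => simp
  | cons x xs ih => simp only [List.map_cons, List.sum_cons, ← ih]; ring

-- a fold that conditionally adds ±1 is an initial value plus a sum
theorem pv_fold_pm (l P N : List ℕ) (init : Int) :
    l.foldl (fun t k => if k ∈ P then t + 1 else if k ∈ N then t - 1 else t) init
      = init + (l.map (fun k => if k ∈ P then (1 : Int) else if k ∈ N then -1 else 0)).sum := by
  rw [← PySem.List.foldl_add]
  apply PySem.List.foldl_congr_mem
  intro acc k _
  split_ifs <;> ring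

theorem pv_fold_mp (l P N : List ℕ) (init : Int) :
    l.foldl (fun t k => if k ∈ P then t - 1 else if k ∈ N then t + 1 else t) init
      = init + (l.map (fun k => if k ∈ P then (-1 : Int) else if k ∈ N then 1 else 0)).sum := by
  rw [← PySem.List.foldl_add]
  apply PySem.List.foldl_congr_mem
  intro acc k _
  split_ifs <;> ring

theorem pv_trit_mul (t u : Int) :
    tritVal t * tritVal u =
      (if tritVal t = 1 then (if tritVal u = 1 then (1 : Int) else if tritVal u = -1 then -1 else 0) else 0)
      + (if tritVal t = -1 then (if tritVal u = 1 then (-1 : Int) else if tritVal u = -1 then 1 else 0) else 0) := by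
  unfold tritVal
  split_ifs <;> simp_all

theorem ternary_matmul_eq_alt (A B : List (List (Int × Int)))
    (hpre : Pre_ternary_matmul A B) : ternary_matmul A B = ternary_matmul_alt A B := by
  obtain ⟨hA, hB, hk, -, -⟩ := hpre
  unfold ternary_matmul ternary_matmul_alt
  simp only []
  apply List.map_congr_left
  intro i hi
  simp only [List.mem_range] at hi
  apply List.map_congr_left
  intro j hj
  simp only [List.mem_range] at hj
  set k1 := (A.headD []).length with hk1
  set av : ℕ → Int := fun k => tritVal (((A.getD i []).getD k (0, 0)).1) with hav
  set bv : ℕ → Int := fun k => tritVal (((B.getD k []).getD j (0, 0)).1) with hbv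
  rw [pv_getD_map A _ [] _ i hi, pv_getD_map A _ [] _ i hi,
      pv_getD_map (List.range (B.headD []).length) _ 0 _ j (by simpa using hj),
      pv_getD_map (List.range (B.headD []).length) _ 0 _ j (by simpa using hj)]
  have hjD : (List.range (B.headD []).length).getD j 0 = j := by
    rw [List.getD_eq_getElem _ _ (by simpa using hj)]; simp
  rw [hjD]
  rw [pv_fold_pm, pv_fold_mp, PySem.List.foldl_add]
  have hmemP : ∀ k < k1, (k ∈ (List.range B.length).filter (fun k => bv k == 1)) ↔ bv k = 1 := by
    intro k hkk
    simp [List.mem_filter, List.mem_range, hk ▸ hkk]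
  have hmemN : ∀ k < k1, (k ∈ (List.range B.length).filter (fun k => bv k == -1)) ↔ bv k = -1 := by
    intro k hkk
    simp [List.mem_filter, List.mem_range, hk ▸ hkk]
  have e1 : (((List.range k1).filter (fun k => av k == 1)).map
        (fun k => if k ∈ (List.range B.length).filter (fun k => bv k == 1) then (1 : Int)
          else if k ∈ (List.range B.length).filter (fun k => bv k == -1) then -1 else 0)).sum
      = ((List.range k1).map (fun k => if av k = 1 then
          (if bv k = 1 then (1 : Int) else if bv k = -1 then -1 else 0) else 0)).sum := by
    rw [List.map_congr_left (g := fun k => if bv k = 1 then (1 : Int) else if bv k = -1 then -1 else 0)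
      (by
        intro k hkmem
        have hkk : k < k1 := by
          have := List.mem_range.mp (List.mem_of_mem_filter hkmem)
          exact this
        rw [if_congr (hmemP k hkk) rfl rfl, if_congr (hmemN k hkk) rfl rfl])]
    rw [pv_sum_filter]
    apply congrArg
    apply List.map_congr_left
    intro k _
    simp [beq_iff_eq]
  have e2 : (((List.range k1).filter (fun k => av k == -1)).map
        (fun k => if k ∈ (List.range B.length).filter (fun k => bv k == 1) then (-1 : Int)
          else if k ∈ (List.range B.length).filter (fun k => bv k == -1) then 1 else 0)).sum
      = ((List.range k1).map (fun k => if av k = -1 then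
          (if bv k = 1 then (-1 : Int) else if bv k = -1 then 1 else 0) else 0)).sum := by
    rw [List.map_congr_left (g := fun k => if bv k = 1 then (-1 : Int) else if bv k = -1 then 1 else 0)
      (by
        intro k hkmem
        have hkk : k < k1 := by
          have := List.mem_range.mp (List.mem_of_mem_filter hkmem)
          exact this
        rw [if_congr (hmemP k hkk) rfl rfl, if_congr (hmemN k hkk) rfl rfl])]
    rw [pv_sum_filter]
    apply congrArg
    apply List.map_congr_left
    intro k _
    simp [beq_iff_eq]
  rw [e1, e2, add_assoc, pv_sum_map_add]
  apply congrArg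
  apply congrArg
  apply List.map_congr_left
  intro k _
  exact pv_trit_mul _ _

-- ===== VERDICT (by name: the statement is the Claim_ definition above) =====
theorem ternary_matmul_spec : Claim_equal_ternary_matmul := by
  intro A B _ hpre
  unfold Spec_ternary_matmul
  exact ternary_matmul_eq_alt A B hpre
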